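-- pv_equiv track=rewrite | github.com/joyce061888/artificial-intelligence | regression/extract_features.py | get_numeric_cuisine
-- ===== SOURCE A (Python) =====
-- def get_numeric_cuisine(cuisine,cuisine_list):
-- 	c1 = None
-- 	c2 = None
-- 	c3 = None
-- 	cs = cuisine.split('+')
-- 	for i,c in enumerate(cuisine_list):
-- 		if c == cs[0]:
-- 			c1 = i
-- 		if len(cs) > 1:
-- 			if c == cs[1]:
-- 				c2 = i
-- 			if len(cs) > 2:
-- 				if c == cs[2]:
-- 					c3 = i
-- 	return c1,c2,c3
-- ===== SOURCE B (Python) =====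
-- def get_numeric_cuisine(cuisine, cuisine_list):
--     # One reversed scan per cuisine name (up to 3), grabbing the LAST index
--     # directly, instead of A's single interleaved forward pass.
--     cs = cuisine.split('+')
--     rev = list(enumerate(cuisine_list))[::-1]
--     res = [None, None, None]
--     for j in range(min(len(cs), 3)):
--         for k, c in rev:
--             if c == cs[j]:
--                 res[j] = k
--                 break
--     return tuple(res)
-- ===== Notes on version B (the rewrite author's own statement) =====
-- stated objective: alternative
-- what changed: A makes one forward pass over cuisine_list updating up to three last-match slots interleaved; B loops over the (at most 3) cuisine names and for each does a reversed scan of the list that stops at the first hit, i.e. the last occurrence.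
import Mathlib
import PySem

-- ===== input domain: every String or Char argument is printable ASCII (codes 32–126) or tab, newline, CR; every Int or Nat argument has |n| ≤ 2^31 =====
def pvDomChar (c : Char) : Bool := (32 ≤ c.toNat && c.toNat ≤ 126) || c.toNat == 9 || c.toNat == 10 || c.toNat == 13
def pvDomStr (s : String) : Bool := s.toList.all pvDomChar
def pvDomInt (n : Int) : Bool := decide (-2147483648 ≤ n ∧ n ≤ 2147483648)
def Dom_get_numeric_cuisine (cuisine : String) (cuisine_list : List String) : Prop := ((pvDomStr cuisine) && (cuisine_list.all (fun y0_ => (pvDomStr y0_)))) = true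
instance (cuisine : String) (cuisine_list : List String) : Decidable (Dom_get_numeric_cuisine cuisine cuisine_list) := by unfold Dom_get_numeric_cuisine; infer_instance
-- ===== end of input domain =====

-- B replaces A's single interleaved forward pass (three last-match slots updated together)
-- by one reversed scan per cuisine name that stops at the first hit; same cost, different traversal.

-- ===== PORT A =====
-- cuisine.split('+'): '+' is non-empty, so split? always returns some; the none branch is
-- unreachable (a totality guard only). cs[0], cs[1], cs[2] are guarded in range by Python's
-- len checks (cs is never empty), so List.getD's default "" is never used.
def get_numeric_cuisine (cuisine : String) (cuisine_list : List String) : Option Int × Option Int × Option Int :=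
  match PySem.Str.split? cuisine "+" with
  | none => (none, none, none)
  | some cs =>
    (PySem.List.enumerate cuisine_list 0).foldl
      (fun (st : Option Int × Option Int × Option Int) ic =>
        (if ic.2 == cs.getD 0 "" then some ic.1 else st.1,
         if 1 < cs.length then
           (if ic.2 == cs.getD 1 "" then some ic.1 else st.2.1)
         else st.2.1,
         if 1 < cs.length then
           (if 2 < cs.length then (if ic.2 == cs.getD 2 "" then some ic.1 else st.2.2) else st.2.2)
         else st.2.2))
      (none, none, none)

-- ===== PORT B =====
-- inner loop of Source B: scan the reversed enumerated list, return at the first match (the last index)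
def pvLastIdx (name : String) : List (Int × String) → Option Int
  | [] => none
  | (k, c) :: rest => if c == name then some k else pvLastIdx name rest

def get_numeric_cuisine_alt (cuisine : String) (cuisine_list : List String) : Option Int × Option Int × Option Int :=
  match PySem.Str.split? cuisine "+" with
  | none => (none, none, none)
  | some cs =>
    let rev := (PySem.List.enumerate cuisine_list 0).reverse
    let res := fun (j : Nat) =>
      if j < min cs.length 3 then pvLastIdx (cs.getD j "") rev else none
    (res 0, res 1, res 2)

-- ===== PRECONDITION & SPEC =====
def Spec_get_numeric_cuisine (cuisine : String) (cuisine_list : List String) (out : Option Int × Option Int × Option Int) : Prop := out = get_numeric_cuisine_alt cuisine cuisine_list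
instance (cuisine : String) (cuisine_list : List String) (out : Option Int × Option Int × Option Int) : Decidable (Spec_get_numeric_cuisine cuisine cuisine_list out) := by unfold Spec_get_numeric_cuisine; infer_instance

-- ===== CLAIM (what is proved, stated in full; the proofs are below) =====
def Claim_equal_get_numeric_cuisine : Prop := ∀ (cuisine : String) (cuisine_list : List String), Dom_get_numeric_cuisine cuisine cuisine_list → Spec_get_numeric_cuisine cuisine cuisine_list (get_numeric_cuisine cuisine cuisine_list)

-- ===== LEMMAS AND PROOFS =====

theorem pvLastIdx_append (name : String) (xs ys : List (Int × String)) :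
    pvLastIdx name (xs ++ ys) = (pvLastIdx name xs).or (pvLastIdx name ys) := by
  induction xs with
  | nil => simp [pvLastIdx]
  | cons p rest ih =>
    obtain ⟨k, c⟩ := p
    by_cases h : c == name <;> simp [pvLastIdx, h, ih]

-- a fold recording the last match equals the first match of the reversed list (or the start value)
theorem foldl_last (name : String) (l : List (Int × String)) :
    ∀ acc : Option Int,
      l.foldl (fun a p => if p.2 == name then some p.1 else a) acc
        = (pvLastIdx name l.reverse).or acc := by
  induction l with
  | nil => intro acc; simp [pvLastIdx]
  | cons p rest ih =>
    intro acc
    obtain ⟨k, c⟩ := p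
    simp only [List.foldl_cons, ih, List.reverse_cons, pvLastIdx_append, Option.or_assoc]
    by_cases h : c == name <;> simp [pvLastIdx, h]

-- A's interleaved fold splits into three independent folds, one per slot
theorem A_fold_eq (cs : List String) (l : List (Int × String)) :
    ∀ a b c : Option Int,
      l.foldl
        (fun (st : Option Int × Option Int × Option Int) ic =>
          (if ic.2 == cs.getD 0 "" then some ic.1 else st.1,
           if 1 < cs.length then
             (if ic.2 == cs.getD 1 "" then some ic.1 else st.2.1)
           else st.2.1,
           if 1 < cs.length then
             (if 2 < cs.length then (if ic.2 == cs.getD 2 "" then some ic.1 else st.2.2) else st.2.2)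
           else st.2.2))
        (a, b, c)
      = (l.foldl (fun a ic => if ic.2 == cs.getD 0 "" then some ic.1 else a) a,
         l.foldl (fun a ic => if 1 < cs.length then
             (if ic.2 == cs.getD 1 "" then some ic.1 else a) else a) b,
         l.foldl (fun a ic => if 1 < cs.length then
             (if 2 < cs.length then (if ic.2 == cs.getD 2 "" then some ic.1 else a) else a) else a) c) := by
  induction l with
  | nil => intro a b c; simp
  | cons p rest ih =>
    intro a b c
    simp only [List.foldl_cons]
    exact ih _ _ _

theorem foldl_id (l : List (Int × String)) (a : Option Int) :
    l.foldl (fun (x : Option Int) (_ : Int × String) => x) a = a := by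
  induction l with
  | nil => rfl
  | cons p rest ih => simp

-- a non-empty separator splits any string into at least one piece
theorem splitOn_go_ne_nil (sep : List Char) :
    ∀ (fuel : Nat) (l cur : List Char) (acc : List (List Char)),
      PySem.Chars.splitOn.go sep fuel l cur acc ≠ [] := by
  intro fuel
  induction fuel with
  | zero => intro l cur acc; simp [PySem.Chars.splitOn.go]
  | succ n ih =>
    intro l cur acc
    cases l with
    | nil => simp [PySem.Chars.splitOn.go]
    | cons c rest =>
      rw [PySem.Chars.splitOn.go]
      by_cases hp : sep.isPrefixOf (c :: rest) = true
      · simpa [hp] using ih _ _ _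
      · simpa [hp] using ih _ _ _

theorem split?_plus_ne_nil (s : String) (cs : List String)
    (h : PySem.Str.split? s "+" = some cs) : cs ≠ [] := by
  have hm := PySem.Str.split?_map s "+"
  rw [h] at hm
  have hchars : PySem.Chars.split? s.toList "+".toList
      = some (cs.map String.toList) := by
    simpa using hm.symm
  have hne : PySem.Chars.splitOn s.toList ['+'] ≠ [] := by
    unfold PySem.Chars.splitOn
    exact splitOn_go_ne_nil _ _ _ _ _
  unfold PySem.Chars.split? at hchars
  simp only [show ("+".toList.isEmpty = false) by decide] at hchars
  intro hnil
  rw [hnil] at hchars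
  simp at hchars
  exact hne hchars

-- ===== VERDICT (by name: the statement is the Claim_ definition above) =====
theorem get_numeric_cuisine_spec : Claim_equal_get_numeric_cuisine := by
  intro cuisine cuisine_list _
  unfold Spec_get_numeric_cuisine get_numeric_cuisine get_numeric_cuisine_alt
  cases hs : PySem.Str.split? cuisine "+" with
  | none => rfl
  | some cs =>
    have hne : cs ≠ [] := split?_plus_ne_nil cuisine cs hs
    have h0 : 0 < cs.length := List.length_pos_iff.mpr hne
    simp only []
    rw [A_fold_eq]
    by_cases h1 : 1 < cs.length
    · by_cases h2 : 2 < cs.length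
      · simp only [if_pos h1, if_pos h2]
        rw [foldl_last, foldl_last, foldl_last]
        simp [h0, h1, h2]
      · simp only [if_pos h1, if_neg h2]
        rw [foldl_last, foldl_last, foldl_id]
        simp [h0, h1, h2]
    · have h2 : ¬ 2 < cs.length := fun h => h1 (by omega)
      simp only [if_neg h1]
      rw [foldl_last, foldl_id]
      simp [h0, h1, h2]
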